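-- pv_equiv track=rewrite | github.com/rspeer/mixmaster | alphagram.py | make_alpha
-- ===== SOURCE A (Python) =====
-- def make_alpha (str):
--     str = str.lower()
--     counts = [];
--
--     for i in range(0, 26):
--         counts.append(0);
--
--     for c in str:
--         if (c >= 'a') and (c <= 'z'):
--             counts[ord(c) - ord('a')] += 1
--
--     rv = "";
--     for i in range(0, 26):
--         for j in range(0, counts[i]):
--             rv += (chr(ord('a') + i));
--
--     return rv;
-- ===== SOURCE B (Python) =====
-- def make_alpha(str):
--     return ''.join(sorted(c for c in str.lower() if 'a' <= c <= 'z'))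
-- ===== Notes on version B (the rewrite author's own statement) =====
-- stated objective: idiomatic
-- what changed: Replaces the 26-bucket counting sort with its nested reconstruction loops by a one-line filter of the lowercased letters followed by a comparison sort and a single join.
import Mathlib
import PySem

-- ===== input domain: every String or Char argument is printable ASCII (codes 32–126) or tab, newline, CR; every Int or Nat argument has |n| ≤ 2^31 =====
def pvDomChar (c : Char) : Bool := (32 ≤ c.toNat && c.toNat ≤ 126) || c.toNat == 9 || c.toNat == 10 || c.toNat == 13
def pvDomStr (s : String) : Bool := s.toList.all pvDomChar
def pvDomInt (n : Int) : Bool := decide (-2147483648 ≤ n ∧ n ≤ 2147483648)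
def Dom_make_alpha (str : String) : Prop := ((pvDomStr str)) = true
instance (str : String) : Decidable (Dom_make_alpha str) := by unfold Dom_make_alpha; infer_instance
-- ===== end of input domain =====

-- B replaces A's 26-bucket counting sort and nested reconstruction loops by filtering the
-- lowercased letters and comparison-sorting them (idiomatic one-liner; same exact output).

-- ===== PORT A =====
-- the body of A's character loop: counts[ord(c) - ord('a')] += 1 for 'a' <= c <= 'z'
def pvCountStep (cts : List Int) (c : Char) : List Int :=
  if 'a' ≤ c ∧ c ≤ 'z' then
    PySem.List.pySetD cts ((c.toNat : Int) - 97)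
      (PySem.List.pyGetD cts ((c.toNat : Int) - 97) 0 + 1)
  else cts

-- A's inner reconstruction loop: for j in range(0, counts[i]): rv += chr(ord('a') + i)
def pvInner (counts : List Int) (rv : List Char) (i : Int) : List Char :=
  (PySem.List.pyRange 0 (PySem.List.pyGetD counts i 0) 1).foldl
    (fun rv _ => rv ++ [Char.ofNat (97 + i.toNat)]) rv

def make_alpha (str : String) : String :=
  String.ofList ((PySem.List.pyRange 0 26 1).foldl
    (pvInner ((PySem.Str.lower str).toList.foldl pvCountStep
      ((PySem.List.pyRange 0 26 1).foldl (fun acc _ => acc ++ [(0:Int)]) []))) [])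

-- ===== PORT B =====
def make_alpha_alt (str : String) : String :=
  String.ofList (PySem.List.sorted
    ((PySem.Str.lower str).toList.filter (fun c => decide ('a' ≤ c ∧ c ≤ 'z')))
    (fun c => c) false)

-- ===== PRECONDITION & SPEC =====
def Spec_make_alpha (str : String) (out : String) : Prop := out = make_alpha_alt str
instance (str : String) (out : String) : Decidable (Spec_make_alpha str out) := by unfold Spec_make_alpha; infer_instance

-- ===== CLAIM (what is proved, stated in full; the proofs are below) =====
def Claim_equal_make_alpha : Prop := ∀ (str : String), Dom_make_alpha str → Spec_make_alpha str (make_alpha str)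

-- ===== LEMMAS AND PROOFS =====

lemma pv_toNat_ofNat (a : Nat) (h : a < 128) : (Char.ofNat a).toNat = a := by
  unfold Char.ofNat
  rw [dif_pos (Or.inl (by omega) : Nat.isValidChar a)]
  simp [Char.ofNatAux, Char.toNat, UInt32.toNat_ofNatLT]

lemma pv_char_le_iff (a b : Char) : a ≤ b ↔ a.toNat ≤ b.toNat := by
  rw [Char.le_def]; exact UInt32.le_iff_toNat_le

lemma pv_char_eq_iff (a b : Char) : a = b ↔ a.toNat = b.toNat :=
  ⟨fun h => by rw [h], fun h => Char.ext (UInt32.toNat_inj.mp h)⟩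

lemma pv_p_iff (c : Char) : ('a' ≤ c ∧ c ≤ 'z') ↔ (97 ≤ c.toNat ∧ c.toNat ≤ 122) := by
  rw [pv_char_le_iff, pv_char_le_iff]; rfl

lemma pv_ofNat_eq_iff (k : Nat) (hk : k < 26) (c : Char) :
    Char.ofNat (97 + k) = c ↔ 97 + k = c.toNat := by
  constructor
  · intro h; rw [← h, pv_toNat_ofNat _ (by omega)]
  · intro h
    apply (pv_char_eq_iff _ _).2
    rw [pv_toNat_ofNat _ (by omega)]; exact h

-- counting loop invariant: the bucket list keeps length 26
lemma pv_counts_len (l : List Char) (cs : List Int) (h : cs.length = 26) :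
    (l.foldl pvCountStep cs).length = 26 := by
  induction l generalizing cs with
  | nil => simpa using h
  | cons c t ih =>
    simp only [List.foldl_cons]
    apply ih
    unfold pvCountStep
    split_ifs with hc
    · simp [PySem.List.length_pySetD, h]
    · exact h

-- counting loop invariant: bucket k ends at its start value plus the letter count
lemma pv_counts_getD (l : List Char) (cs : List Int) (h : cs.length = 26)
    (k : Nat) (hk : k < 26) :
    (l.foldl pvCountStep cs).getD k 0 =
      cs.getD k 0 + ((l.filter (fun c => decide ('a' ≤ c ∧ c ≤ 'z'))).count (Char.ofNat (97 + k)) : Int) := by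
  induction l generalizing cs with
  | nil => simp
  | cons c t ih =>
    simp only [List.foldl_cons]
    by_cases hc : ('a' ≤ c ∧ c ≤ 'z')
    · have hb := (pv_p_iff c).1 hc
      have hstep : pvCountStep cs c = cs.set (c.toNat - 97) (cs.getD (c.toNat - 97) 0 + 1) := by
        unfold pvCountStep
        rw [if_pos hc, show ((c.toNat : Int) - 97) = ((c.toNat - 97 : Nat) : Int) by omega,
            PySem.List.pySetD_natCast, PySem.List.pyGetD_natCast]
      rw [hstep, ih _ (by simp [h]), List.filter_cons, if_pos (by simpa using hc)]
      have hlt : c.toNat - 97 < cs.length := by omega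
      by_cases hck : Char.ofNat (97 + k) = c
      · have hkj : k = c.toNat - 97 := by
          have := (pv_ofNat_eq_iff k hk c).1 hck
          omega
        have hcount : (c :: t.filter (fun c => decide ('a' ≤ c ∧ c ≤ 'z'))).count (Char.ofNat (97 + k)) =
            (t.filter (fun c => decide ('a' ≤ c ∧ c ≤ 'z'))).count (Char.ofNat (97 + k)) + 1 := by
          rw [hck, List.count_cons_self]
        rw [hcount]
        subst hkj
        rw [List.getD_eq_getElem?_getD, List.getElem?_set_self hlt, Option.getD_some,
            List.getD_eq_getElem?_getD]
        push_cast
        ring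
      · have hkj : k ≠ c.toNat - 97 := fun he =>
          hck ((pv_ofNat_eq_iff k hk c).2 (by omega))
        rw [List.count_cons_of_ne (Ne.symm hck),
            List.getD_eq_getElem?_getD, List.getElem?_set_ne (Ne.symm (by omega)),
            ← List.getD_eq_getElem?_getD]
    · have hstep : pvCountStep cs c = cs := by unfold pvCountStep; rw [if_neg hc]
      rw [hstep, ih _ h, List.filter_cons, if_neg (by simpa using hc)]

-- the shape of A's reconstructed string: buckets 0..n-1 expanded in order
def pvRep (g : Nat → Nat) : Nat → List Char
  | 0 => []
  | n+1 => pvRep g n ++ List.replicate (g n) (Char.ofNat (97 + n))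

lemma pv_mem_pvRep (g : Nat → Nat) (n : Nat) (c : Char) (h : c ∈ pvRep g n) :
    ∃ i, i < n ∧ c = Char.ofNat (97 + i) := by
  induction n with
  | zero => simp [pvRep] at h
  | succ m ih =>
    simp only [pvRep, List.mem_append] at h
    rcases h with h | h
    · obtain ⟨i, hi, hc⟩ := ih h
      exact ⟨i, by omega, hc⟩
    · exact ⟨m, by omega, List.eq_of_mem_replicate h⟩

lemma pv_pairwise_pvRep (g : Nat → Nat) (n : Nat) (hn : n ≤ 26) :
    (pvRep g n).Pairwise (· ≤ ·) := by
  induction n with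
  | zero => simp [pvRep]
  | succ m ih =>
    rw [pvRep, List.pairwise_append]
    refine ⟨ih (by omega), List.pairwise_replicate.2 (Or.inr le_rfl), ?_⟩
    intro a ha b hb
    obtain ⟨i, hi, rfl⟩ := pv_mem_pvRep g m a ha
    obtain rfl := List.eq_of_mem_replicate hb
    rw [pv_char_le_iff, pv_toNat_ofNat _ (by omega), pv_toNat_ofNat _ (by omega)]
    omega

lemma pv_count_pvRep (g : Nat → Nat) (n : Nat) (hn : n ≤ 26) (c : Char) :
    (pvRep g n).count c =
      if 97 ≤ c.toNat ∧ c.toNat < 97 + n then g (c.toNat - 97) else 0 := by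
  induction n with
  | zero =>
    simp only [pvRep, List.count_nil]
    rw [if_neg (by omega)]
  | succ m ih =>
    rw [pvRep, List.count_append, ih (by omega), List.count_replicate]
    simp only [beq_iff_eq]
    by_cases hcn : c.toNat = 97 + m
    · rw [if_pos ((pv_ofNat_eq_iff m (by omega) c).2 hcn.symm)]
      rw [if_neg (by omega), if_pos (by omega), show c.toNat - 97 = m by omega]
      omega
    · rw [if_neg (fun he => hcn ((pv_ofNat_eq_iff m (by omega) c).1 he).symm)]
      by_cases hr : 97 ≤ c.toNat ∧ c.toNat < 97 + m
      · rw [if_pos hr, if_pos (by omega)]; omega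
      · rw [if_neg hr, if_neg (by omega)]

-- A's inner loop appends one bucket's worth of the letter
lemma pv_inner_eq (counts : List Int) (rv : List Char) (i : Int) :
    pvInner counts rv i =
      rv ++ List.replicate (PySem.List.pyGetD counts i 0).toNat (Char.ofNat (97 + i.toNat)) := by
  unfold pvInner
  rw [PySem.List.foldl_append_singleton_eq_map]
  congr 1
  rw [List.map_const', PySem.List.length_pyRange_one]
  congr 1
  omega

-- A's outer loop builds pvRep of the bucket sizes
lemma pv_rv_eq (counts : List Int) (n : Nat) :
    (PySem.List.pyRange 0 (n : Int) 1).foldl (pvInner counts) [] =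
      pvRep (fun k => (PySem.List.pyGetD counts (k : Int) 0).toNat) n := by
  induction n with
  | zero => simp [PySem.List.pyRange_one_eq_nil, pvRep]
  | succ m ih =>
    have hcast : ((m + 1 : Nat) : Int) = (m : Int) + 1 := by push_cast; ring
    rw [hcast, PySem.List.pyRange_one_succ_right (by positivity), List.foldl_append]
    simp only [List.foldl_cons, List.foldl_nil]
    rw [ih, pv_inner_eq]
    simp [pvRep]

-- the sorted form of the filtered letters equals the bucket expansion
lemma pv_sorted_rep (L : List Char) (g : Nat → Nat)
    (hget : ∀ k : Nat, k < 26 → g k = L.count (Char.ofNat (97 + k)))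
    (hsub : ∀ c ∈ L, 'a' ≤ c ∧ c ≤ 'z') :
    pvRep g 26 = PySem.List.sorted L (fun c => c) false := by
  have hperm : (pvRep g 26).Perm L := by
    rw [List.perm_iff_count]
    intro c
    rw [pv_count_pvRep g 26 le_rfl c]
    by_cases hr : 97 ≤ c.toNat ∧ c.toNat < 97 + 26
    · rw [if_pos hr, hget _ (by omega), show 97 + (c.toNat - 97) = c.toNat by omega,
          Char.ofNat_toNat]
    · rw [if_neg hr, eq_comm, List.count_eq_zero]
      intro hmem
      have := (pv_p_iff c).1 (hsub c hmem)
      omega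
  exact (PySem.List.sorted_id_eq_of_perm_of_pairwise L (pvRep g 26) hperm
    (pv_pairwise_pvRep g 26 le_rfl)).symm

-- the two ports agree
set_option maxRecDepth 8000 in
lemma pv_main (str : String) : make_alpha str = make_alpha_alt str := by
  unfold make_alpha make_alpha_alt
  have hinit : (PySem.List.pyRange 0 26 1).foldl (fun acc _ => acc ++ [(0:Int)]) ([] : List Int)
      = List.replicate 26 0 := by decide
  rw [hinit]
  set L := (PySem.Str.lower str).toList.filter (fun c => decide ('a' ≤ c ∧ c ≤ 'z')) with hL
  set cs := (PySem.Str.lower str).toList.foldl pvCountStep (List.replicate 26 0) with hcs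
  have hlen : cs.length = 26 := pv_counts_len _ _ (by simp)
  set g : Nat → Nat := fun k => (PySem.List.pyGetD cs (k : Int) 0).toNat with hg
  have hget : ∀ k : Nat, k < 26 → g k = L.count (Char.ofNat (97 + k)) := by
    intro k hk
    have h2 := pv_counts_getD (PySem.Str.lower str).toList (List.replicate 26 0) (by simp) k hk
    rw [← hcs, ← hL] at h2
    show (PySem.List.pyGetD cs ((k : Nat) : Int) 0).toNat = L.count (Char.ofNat (97 + k))
    rw [PySem.List.pyGetD_natCast, h2, List.getD_replicate 0 hk, zero_add, Int.toNat_natCast]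
  have hsub : ∀ c ∈ L, 'a' ≤ c ∧ c ≤ 'z' := by
    intro c hmem
    rw [hL, List.mem_filter] at hmem
    simpa using hmem.2
  have h26 : (26 : Int) = ((26 : Nat) : Int) := by norm_num
  rw [h26, pv_rv_eq cs 26]
  exact congrArg String.ofList (pv_sorted_rep L g hget hsub)

-- ===== VERDICT (by name: the statement is the Claim_ definition above) =====
theorem make_alpha_spec : Claim_equal_make_alpha := by
  intro str _
  unfold Spec_make_alpha
  exact pv_main str
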